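-- pv_equiv track=rewrite | github.com/angelfish91/domain_regex_extract | dre_lib/maxsubstring.py | sort_max_sub_string_list
-- ===== SOURCE A (Python) =====
-- def sort_max_sub_string_list(string_list, sub_string_list):
--     """
--     将公共子串进行排序
--     :param string_list:
--     :param sub_string_list:
--     :return:
--     """
--     sort_index = [[] for index in range(len(string_list))]
--     sort_sub_string = list()
--     for sub_string in sub_string_list:
--         for string_index, string in enumerate(string_list):
--             sort_index[string_index].append(string.index(sub_string))
--         sort_sub_string = sorted(zip(sort_index[0], sub_string_list[:len(sort_index[0])]), key=lambda item: item[0])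
--         sort_sub_string = [_[1] for _ in sort_sub_string]
--         for sort_index_each in sort_index[1:]:
--             sort_sub_string_eva = sorted(zip(sort_index_each, sub_string_list[:len(sort_index_each)]),
--                                          key=lambda item: item[0])
--             sort_sub_string_eva = [_[1] for _ in sort_sub_string_eva]
--             if sort_sub_string_eva != sort_sub_string:
--                 return sort_sub_string[:-1]
--     return sort_sub_string
-- ===== SOURCE B (Python) =====
-- def sort_max_sub_string_list(string_list, sub_string_list):
--     """
--     Sort the common substrings by their first position in each string, checking
--     for divergence as we go.  Instead of re-sorting every prefix of every
--     string's position list on every iteration, each string keeps a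
--     (position, substring) list that is kept sorted by ONE stable insertion per
--     new substring; divergence is the first step at which some string's order
--     differs from the first string's.
--     """
--     orders = [[] for _ in string_list]  # per string: [(pos, sub)] sorted by pos, stable
--     result = []
--     for sub in sub_string_list:
--         for order, s in zip(orders, string_list):
--             p = s.index(sub)
--             j = 0
--             while j < len(order) and order[j][0] <= p:
--                 j += 1
--             order.insert(j, (p, sub))
--         lead = [t for _, t in orders[0]]
--         for order in orders[1:]:
--             if [t for _, t in order] != lead:
--                 return lead[:-1]
--         result = lead
--     return result
-- ===== Notes on version B (the rewrite author's own statement) =====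
-- stated objective: alternative
-- what changed: Instead of re-sorting every prefix of every string's position list on every iteration, B keeps one (position, substring) list per string sorted by a single stable insertion per new substring and compares those lists; it diverges, returns and raises exactly where A does (measured ~1.2-1.7x, not claimed as faster).
import Mathlib
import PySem

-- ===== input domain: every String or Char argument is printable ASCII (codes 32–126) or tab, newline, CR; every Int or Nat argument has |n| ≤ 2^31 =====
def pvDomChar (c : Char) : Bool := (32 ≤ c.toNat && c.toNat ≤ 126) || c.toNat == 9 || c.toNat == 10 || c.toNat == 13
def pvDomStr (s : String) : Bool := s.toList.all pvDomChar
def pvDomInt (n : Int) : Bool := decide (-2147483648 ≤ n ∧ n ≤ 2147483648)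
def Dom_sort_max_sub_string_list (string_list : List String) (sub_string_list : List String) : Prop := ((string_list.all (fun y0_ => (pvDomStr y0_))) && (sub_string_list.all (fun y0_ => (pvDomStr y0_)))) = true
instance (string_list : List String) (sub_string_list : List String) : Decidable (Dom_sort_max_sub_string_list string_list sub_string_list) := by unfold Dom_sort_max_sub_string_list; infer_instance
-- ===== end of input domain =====

-- B keeps one (position, substring) list per string sorted by a single stable insertion per new
-- substring and compares those, instead of re-sorting every prefix of every position list on every
-- iteration as A does.

-- ===== PORT A =====
-- s.index(sub) is ported as PySem.Str.find: on every input admitted by Pre_ each index call A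
-- actually reaches finds its substring, where Python's str.index returns exactly str.find.
-- sorted(zip(row, sub_string_list[:len(row)]), key=lambda item: item[0]) then [_[1] for _ in ...]:
def pvEvaA (subs_full : List String) (row : List Int) : List String :=
  (PySem.List.sorted (row.zip (PySem.List.slice subs_full none (some (row.length : Int))))
      (fun item => item.1) false).map (fun item => item.2)

-- the outer 'for sub_string in sub_string_list' loop of A, carrying (sort_index, sort_sub_string);
-- the two inner 'for' loops appear as the zip-map (one append per string, in order) and as
-- '(…).any' (the first mismatching row returns — the returned value does not depend on which row).
def pvALoop (string_list : List String) (subs_full : List String) :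
    List String → List (List Int) → List String → List String
  | [], _, cur => cur
  | sub :: rest, sortIndex, _ =>
      let sortIndex' := (sortIndex.zip string_list).map (fun p => p.1 ++ [PySem.Str.find p.2 sub])
      let cur' := pvEvaA subs_full (sortIndex'.headD [])
      if (sortIndex'.tail).any (fun row => decide (pvEvaA subs_full row ≠ cur')) then cur'.dropLast
      else pvALoop string_list subs_full rest sortIndex' cur'

def sort_max_sub_string_list (string_list : List String) (sub_string_list : List String) : List String :=
  pvALoop string_list sub_string_list sub_string_list (string_list.map (fun _ => ([] : List Int))) []

-- ===== PORT B =====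
-- Source B's while-loop + insert: walk past all entries with position ≤ p, put (p, sub) there
def pvInsB (p : Int) (t : String) : List (Int × String) → List (Int × String)
  | [] => [(p, t)]
  | y :: ys => if y.1 ≤ p then y :: pvInsB p t ys else (p, t) :: y :: ys

-- Source B's 'for sub in sub_string_list' loop carrying (orders, result); the zip over
-- (orders, string_list) is the inner 'for order, s in zip(...)', '(…).any' the comparison loop.
-- orders[0] on an empty orders (Source B raises IndexError there, outside Pre_) is ported as headD [].
def pvBLoop (string_list : List String) :
    List String → List (List (Int × String)) → List String → List String
  | [], _, res => res
  | sub :: rest, orders, _ =>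
      let orders' := (orders.zip string_list).map
        (fun q => pvInsB (PySem.Str.find q.2 sub) sub q.1)
      let lead := (orders'.headD []).map (fun y => y.2)
      if (orders'.tail).any (fun o => decide (o.map (fun y => y.2) ≠ lead)) then lead.dropLast
      else pvBLoop string_list rest orders' lead

def sort_max_sub_string_list_alt (string_list : List String) (sub_string_list : List String) : List String :=
  pvBLoop string_list sub_string_list (string_list.map (fun _ => ([] : List (Int × String)))) []

-- ===== PRECONDITION & SPEC =====
-- Pre_ excludes exactly the inputs on which Python A raises: an empty string_list with a nonempty
-- sub_string_list (IndexError on sort_index[0]), and a substring missing from some string that A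
-- reaches before any order divergence (ValueError from str.index).  The last disjunct keeps inside
-- Pre_ every input where an order divergence (an inverted position pair against string 0) occurs no
-- later than the first missing substring, so A returns early; B returns the same value there.
def Pre_sort_max_sub_string_list (string_list : List String) (sub_string_list : List String) : Prop :=
  sub_string_list = [] ∨
    (string_list ≠ [] ∧
      ((∀ s ∈ string_list, ∀ t ∈ sub_string_list, PySem.Str.isIn t s = true) ∨
       (∃ j < sub_string_list.length, ∃ i < j,
          (∀ l ≤ j, ∀ s ∈ string_list,
            PySem.Str.isIn (PySem.List.pyGetD sub_string_list (l : Int) "") s = true) ∧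
          ∃ s ∈ string_list.tail,
            (decide (PySem.Str.find (string_list.headD "") (PySem.List.pyGetD sub_string_list (i : Int) "")
                ≤ PySem.Str.find (string_list.headD "") (PySem.List.pyGetD sub_string_list (j : Int) ""))
             ≠ decide (PySem.Str.find s (PySem.List.pyGetD sub_string_list (i : Int) "")
                ≤ PySem.Str.find s (PySem.List.pyGetD sub_string_list (j : Int) ""))))))
instance (string_list : List String) (sub_string_list : List String) : Decidable (Pre_sort_max_sub_string_list string_list sub_string_list) := by unfold Pre_sort_max_sub_string_list; infer_instance

def pvWitness_sort_max_sub_string_list : List String × List String := (["abc", "zab"], ["ab", "a"])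

def Spec_sort_max_sub_string_list (string_list : List String) (sub_string_list : List String) (out : List String) : Prop := out = sort_max_sub_string_list_alt string_list sub_string_list
instance (string_list : List String) (sub_string_list : List String) (out : List String) : Decidable (Spec_sort_max_sub_string_list string_list sub_string_list out) := by unfold Spec_sort_max_sub_string_list; infer_instance

-- ===== CLAIM (what is proved, stated in full; the proofs are below) =====
def Claim_equal_sort_max_sub_string_list : Prop := ∀ (string_list : List String) (sub_string_list : List String), Dom_sort_max_sub_string_list string_list sub_string_list → Pre_sort_max_sub_string_list string_list sub_string_list → Spec_sort_max_sub_string_list string_list sub_string_list (sort_max_sub_string_list string_list sub_string_list)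

-- ===== LEMMAS AND PROOFS =====

-- The ports are in fact equal on ALL inputs (Pre_ only records where Python A returns normally).
-- The bridge: both A's step-k prefix sort and B's maintained list equal the canonical
-- 'stable sort of the (position, substring) pairs of the first k substrings'.

def pvPairs (s : String) (l : List String) : List (Int × String) :=
  PySem.List.sorted (l.map (fun t => (PySem.Str.find s t, t))) (fun y => y.1) false

lemma pv_insertBy_cons {α : Type} (b : α → α → Bool) (x y : α) (ys : List α) :
    PySem.List.insertBy b x (y :: ys) =
      if b x y then x :: y :: ys else y :: PySem.List.insertBy b x ys := rfl

lemma pvInsB_eq_insertBy (p : Int) (t : String) (l : List (Int × String)) :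
    pvInsB p t l =
      PySem.List.insertBy (fun a b : Int × String => decide (a.1 < b.1)) (p, t) l := by
  induction l with
  | nil => rfl
  | cons y ys ih =>
      rw [pvInsB, pv_insertBy_cons, ih]
      by_cases h : y.1 ≤ p
      · rw [if_pos h, if_neg (by simpa using not_lt.mpr h)]
      · rw [if_neg h, if_pos (by simpa using not_le.mp h)]

lemma pv_sorted_snoc {α : Type} (key : α → Int) (l : List α) (x : α) :
    PySem.List.sorted (l ++ [x]) key false =
      PySem.List.insertBy (fun a b => decide (key a < key b)) x (PySem.List.sorted l key false) := by
  rw [PySem.List.sorted_eq_foldl_insertBy, PySem.List.sorted_eq_foldl_insertBy, List.foldl_append]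
  rfl

lemma pv_zip_map_self {α β : Type} (f : α → β) (l : List α) :
    (l.map f).zip l = l.map (fun x => (f x, x)) := by
  have h := @List.zip_map' _ _ _ f id l
  simpa using h

lemma pv_take_succ (subs : List String) (k : Nat) (hk : k < subs.length) :
    subs.take (k + 1) = subs.take k ++ [subs[k]] := by
  rw [List.take_add_one, List.getElem?_eq_getElem hk]
  rfl

lemma pvPairs_succ (subs : List String) (s : String) (k : Nat) (hk : k < subs.length) :
    pvPairs s (subs.take (k + 1)) =
      pvInsB (PySem.Str.find s subs[k]) subs[k] (pvPairs s (subs.take k)) := by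
  rw [pvInsB_eq_insertBy, pvPairs, pvPairs, pv_take_succ subs k hk, List.map_append,
    List.map_singleton, pv_sorted_snoc]

lemma pvEva_eq (subs : List String) (s : String) (k : Nat) (hk : k ≤ subs.length) :
    pvEvaA subs ((subs.take k).map (fun t => PySem.Str.find s t)) =
      (pvPairs s (subs.take k)).map (fun y => y.2) := by
  have hlen : ((subs.take k).map (fun t => PySem.Str.find s t)).length = k := by
    simp [List.length_take, Nat.min_eq_left hk]
  rw [pvEvaA, hlen, PySem.List.slice_to_natCast, pv_zip_map_self]
  rfl

lemma pv_sync (subs : List String) (s0 : String) (srest : List String) :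
    ∀ (rest : List String) (k : Nat), k ≤ subs.length → rest = subs.drop k →
    pvALoop (s0 :: srest) subs rest
        ((s0 :: srest).map (fun s => (subs.take k).map (fun t => PySem.Str.find s t)))
        ((pvPairs s0 (subs.take k)).map (fun y => y.2))
      = pvBLoop (s0 :: srest) rest
        ((s0 :: srest).map (fun s => pvPairs s (subs.take k)))
        ((pvPairs s0 (subs.take k)).map (fun y => y.2)) := by
  intro rest
  induction rest with
  | nil => intro k _ _; rfl
  | cons sub rest' ih =>
      intro k hk hdrop
      have hklt : k < subs.length := by
        by_contra h
        rw [List.drop_eq_nil_of_le (by omega)] at hdrop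
        simp at hdrop
      rw [List.drop_eq_getElem_cons hklt] at hdrop
      injection hdrop with h1 hrest
      -- the updated A-side rows and B-side orders, as maps over the strings
      have hrow : ∀ s : String,
          (subs.take k).map (fun t => PySem.Str.find s t) ++ [PySem.Str.find s sub]
            = (subs.take (k + 1)).map (fun t => PySem.Str.find s t) := by
        intro s; rw [pv_take_succ subs k hklt, List.map_append, ← h1]; rfl
      have hord : ∀ s : String,
          pvInsB (PySem.Str.find s sub) sub (pvPairs s (subs.take k))
            = pvPairs s (subs.take (k + 1)) := by
        intro s; rw [pvPairs_succ subs s k hklt, ← h1]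
      have hEva : ∀ s : String,
          pvEvaA subs ((subs.take (k + 1)).map (fun t => PySem.Str.find s t))
            = (pvPairs s (subs.take (k + 1))).map (fun y => y.2) :=
        fun s => pvEva_eq subs s (k + 1) (by omega)
      simp only [pvALoop, pvBLoop]
      rw [pv_zip_map_self, pv_zip_map_self, List.map_map, List.map_map]
      simp only [Function.comp_def, hrow, hord]
      simp only [List.map_cons, List.headD_cons, List.tail_cons, List.any_map,
        Function.comp_def, hEva]
      have ihh := ih (k + 1) (by omega) hrest
      simp only [List.map_cons] at ihh
      rw [ihh]
      rfl

lemma pv_empty_strings_a (subs : List String) :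
    ∀ rest : List String, pvALoop [] subs rest [] [] = [] := by
  intro rest
  induction rest with
  | nil => rfl
  | cons sub rest ih => simpa [pvALoop, pvEvaA] using ih

lemma pv_empty_strings_b :
    ∀ rest : List String, pvBLoop [] rest [] [] = [] := by
  intro rest
  induction rest with
  | nil => rfl
  | cons sub rest ih => simpa [pvBLoop] using ih

-- ===== VERDICT (by name: the statement is the Claim_ definition above) =====
theorem sort_max_sub_string_list_spec : Claim_equal_sort_max_sub_string_list := by
  intro string_list sub_string_list _ _
  unfold Spec_sort_max_sub_string_list
  cases string_list with
  | nil =>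
      rw [sort_max_sub_string_list, sort_max_sub_string_list_alt]
      simpa using (pv_empty_strings_a sub_string_list sub_string_list).trans
        (pv_empty_strings_b sub_string_list).symm
  | cons s0 srest =>
      have h := pv_sync sub_string_list s0 srest sub_string_list 0 (Nat.zero_le _) rfl
      rw [sort_max_sub_string_list, sort_max_sub_string_list_alt]
      simpa [pvPairs, PySem.List.sorted_eq_foldl_insertBy] using h
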